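-- pv_equiv track=rewrite | github.com/eaubinais/Meta_Problems | Level 3/Slippery Trip.py | getMaxCollectableCoins
-- ===== SOURCE A (Python) =====
-- from typing import List, Tuple
--
-- def getMaxCollectableCoins(R: int, C: int, G: List[List[str]]) -> int:
--     def LineType(L: List[str]) -> List[str]:
--         return list(set(L))
--
--     def FullLineValue(L: List[str], C: int) -> Tuple[int, int]:
--         """
--         Returns the value (a, b) of a line that has all 4 elements. See next function for a definition of value.
--         """
--         extended_line = L + L
--         m = 0
--         j = 0
--
--         while j < C:
--             if L[j] != '>':
--                 j+=1
--                 continue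
--             base_j = j
--             val = 0
--             for i in range(1, C):
--                 if extended_line[j+i] == 'v':
--                     base_j = j+i #It is useless to test all ">" before this point as they would give less coins.
--                     break
--                 elif extended_line[j+i] == '*':
--                     val += 1
--             if val > m:
--                 m = val
--             j = base_j+1
--         return (-1, 1 if m == 0 else m)
--
--
--
--     def LineValue(L: List[str], C: int, t: List[str]) -> Tuple[int, int]:
--         """
--         Returns a couple (a, b) where a represents the value earned if we stay on line L
--         and b is the value earned if we keep going.
--         A value of -1 represents that we cannot perform the action.
--
--         """
--         #Only one element --> easy to check
--         if len(t) == 1: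
--             if '>' in t:
--                 return (0, -1)
--             else:
--                 return (-1, int('*' in t))
--         #Everything is there, then compute value of full line
--         if len(t) == 4:
--             return FullLineValue(L, C)
--         if len(t) == 2:
--             if '*' not in t:
--                 return (-1, 0)
--             if '>' in t:
--                 return (L.count('*') ,1)
--             else:
--                 return (-1, 1)
--
--         # if len(t) == 3:
--         if '*' not in t:
--             return (-1, 0)
--         elif 'v' not in t:
--             return (L.count('*'), 1)
--         elif '>' not in t:
--             return (-1, 1)
--         else:
--             return FullLineValue(L, C)
--
--     downwards = 0
--     max_stay = 0
--
--     for L in G: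
--         stay, downward = LineValue(L, C, LineType(L))
--
--         if stay >= 0:
--             max_stay = max(max_stay, downwards + stay)
--         if downward >= 0:
--             downwards += downward
--         else:
--             return max_stay
--
--
--     return max(downwards, max_stay)
-- ===== SOURCE B (Python) =====
-- def getMaxCollectableCoins(R, C, G):
--     downwards = 0
--     max_stay = 0
--     for L in G:
--         stay, down = _line_value(L, C)
--         if stay >= 0:
--             max_stay = max(max_stay, downwards + stay)
--         if down < 0:
--             return max_stay
--         downwards += down
--     return max(downwards, max_stay)
--
--
-- def _line_value(L, C):
--     t = set(L)
--     n = len(t)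
--     has_g, has_v, has_s = '>' in t, 'v' in t, '*' in t
--     if n == 1:
--         return (0, -1) if has_g else (-1, 1 if has_s else 0)
--     if n == 2:
--         if not has_s:
--             return (-1, 0)
--         return (L.count('*'), 1) if has_g else (-1, 1)
--     if n != 4:
--         if not has_s:
--             return (-1, 0)
--         if not has_v:
--             return (L.count('*'), 1)
--         if not has_g:
--             return (-1, 1)
--     return _full_value(L, C)
--
--
-- def _full_value(row, C):
--     # best run value via a right-to-left suffix DP over the doubled row
--     if 'v' not in row:
--         best = row.count('*') if '>' in row else 0
--     else:
--         ext = row + row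
--         s = 0
--         vals = [0] * len(ext)
--         for k in range(len(ext) - 1, -1, -1):
--             if ext[k] == 'v':
--                 s = 0
--             elif ext[k] == '*':
--                 s += 1
--             vals[k] = s
--         best = 0
--         for j in range(C):
--             if row[j] == '>' and vals[j + 1] > best:
--                 best = vals[j + 1]
--     return (-1, 1 if best == 0 else best)
-- ===== Notes on version B (the rewrite author's own statement) =====
-- stated objective: alternative
-- what changed: The per-line run maximisation is rewritten as a single right-to-left suffix DP over the doubled row (stars-until-next-'v' table) plus one pass over the '>' cells, replacing A's forward jump-scan that re-scans a window of up to C-1 cells from each surviving '>'; Pre_ excludes grids where a row that needs this full scan has length different from C, the natural grid shape, since there A's C-1-cell window cap and L+L wrap offset read cells by an accidental row-length arithmetic (and both programs raise IndexError on rows shorter than C).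
-- outside the precondition, e.g. on getMaxCollectableCoins(1, 1, [['>', '*', '*', 'v']]): A returns 1, B returns 2
import Mathlib
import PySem

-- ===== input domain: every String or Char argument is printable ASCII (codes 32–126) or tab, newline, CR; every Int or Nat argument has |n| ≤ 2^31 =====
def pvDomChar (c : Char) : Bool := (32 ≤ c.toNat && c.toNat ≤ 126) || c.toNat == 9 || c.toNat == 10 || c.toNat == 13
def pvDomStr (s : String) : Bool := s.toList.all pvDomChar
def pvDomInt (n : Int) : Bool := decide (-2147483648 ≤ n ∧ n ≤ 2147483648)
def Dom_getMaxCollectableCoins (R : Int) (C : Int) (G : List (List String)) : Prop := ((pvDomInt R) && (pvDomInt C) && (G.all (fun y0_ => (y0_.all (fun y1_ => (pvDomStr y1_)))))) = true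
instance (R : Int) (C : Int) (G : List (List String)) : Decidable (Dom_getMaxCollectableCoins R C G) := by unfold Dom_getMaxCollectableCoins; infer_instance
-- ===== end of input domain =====

-- B replaces A's per-line forward jump-scan by a right-to-left suffix DP over the doubled row;
-- Pre_ restricts rows that need the full scan to length exactly C (the natural grid shape).


-- ===== PORT A =====

-- LineType(L) = list(set(L)) (A only uses its length and membership, so set order is immaterial)
def pvLineType (L : List String) : List String := PySem.Set.ofList L

-- the inner 'for i in range(1, C)' of FullLineValue, with its break; state = (base_j, val)
def pvAInner (ext : List String) (j : Int) : List Int → Int × Int → Int × Int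
  | [], st => st
  | i :: rest, st =>
      if PySem.List.pyGetD ext (j + i) "" = "v" then (j + i, st.2)
      else if PySem.List.pyGetD ext (j + i) "" = "*" then pvAInner ext j rest (st.1, st.2 + 1)
      else pvAInner ext j rest st

-- termination helper for the while loop: base_j never moves left of j
theorem pvAInner_fst_ge (ext : List String) (j : Int) :
    ∀ (is : List Int) (st : Int × Int), j ≤ st.1 → (∀ i ∈ is, 1 ≤ i) →
      j ≤ (pvAInner ext j is st).1 := by
  intro is
  induction is with
  | nil => intro st h _; exact h
  | cons i rest ih =>
      intro st h hall
      simp only [pvAInner]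
      split
      · have := hall i (by simp); omega
      · split
        · exact ih _ h (fun k hk => hall k (by simp [hk]))
        · exact ih _ h (fun k hk => hall k (by simp [hk]))

-- the 'while j < C' loop of FullLineValue
def pvFullWhile (L ext : List String) (C : Int) (j m : Int) : Int :=
  if h : j < C then
    if PySem.List.pyGetD L j "" ≠ ">" then
      pvFullWhile L ext C (j + 1) m
    else
      pvFullWhile L ext C ((pvAInner ext j (PySem.List.pyRange 1 C 1) (j, 0)).1 + 1)
        (if (pvAInner ext j (PySem.List.pyRange 1 C 1) (j, 0)).2 > m
         then (pvAInner ext j (PySem.List.pyRange 1 C 1) (j, 0)).2 else m)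
  else m
termination_by (C - j).toNat
decreasing_by
  · omega
  · have : j ≤ (pvAInner ext j (PySem.List.pyRange 1 C 1) (j, 0)).1 :=
      pvAInner_fst_ge ext j _ _ le_rfl (fun i hi => ((PySem.List.mem_pyRange_one).1 hi).1)
    omega

def pvFullLineValue (L : List String) (C : Int) : Int × Int :=
  (-1, if pvFullWhile L (L ++ L) C 0 0 = 0 then 1 else pvFullWhile L (L ++ L) C 0 0)

def pvLineValue (L : List String) (C : Int) (t : List String) : Int × Int :=
  if t.length = 1 then
    if ">" ∈ t then (0, -1) else (-1, if "*" ∈ t then 1 else 0)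
  else if t.length = 4 then pvFullLineValue L C
  else if t.length = 2 then
    if "*" ∉ t then (-1, 0)
    else if ">" ∈ t then ((L.count "*" : Int), 1)
    else (-1, 1)
  else
    if "*" ∉ t then (-1, 0)
    else if "v" ∉ t then ((L.count "*" : Int), 1)
    else if ">" ∉ t then (-1, 1)
    else pvFullLineValue L C

-- the main 'for L in G' loop with its early return
def pvAMain (C : Int) : List (List String) → Int → Int → Int
  | [], dw, ms => max dw ms
  | L :: rest, dw, ms =>
      let sd := pvLineValue L C (pvLineType L)
      let ms' := if sd.1 ≥ 0 then max ms (dw + sd.1) else ms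
      if sd.2 ≥ 0 then pvAMain C rest (dw + sd.2) ms' else ms'

def getMaxCollectableCoins (R : Int) (C : Int) (G : List (List String)) : Int :=
  pvAMain C G 0 0

-- ===== PORT B =====

-- the backwards 'for k in reversed(range(len(ext)))' DP: vals[k] = stars from k until the next 'v'
def pvVals : List String → List Int
  | [] => []
  | c :: rest =>
      (if c = "v" then 0
       else if c = "*" then (pvVals rest).getD 0 0 + 1
       else (pvVals rest).getD 0 0) :: pvVals rest

def pvBFull (row : List String) (C : Int) : Int × Int :=
  (-1,
    if (if "v" ∉ row then
          if ">" ∈ row then (row.count "*" : Int) else 0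
        else
          (PySem.List.pyRange 0 C 1).foldl
            (fun best j =>
              if PySem.List.pyGetD row j "" = ">" ∧
                  PySem.List.pyGetD (pvVals (row ++ row)) (j + 1) 0 > best
              then PySem.List.pyGetD (pvVals (row ++ row)) (j + 1) 0
              else best) 0) = 0
    then 1
    else (if "v" ∉ row then
            if ">" ∈ row then (row.count "*" : Int) else 0
          else
            (PySem.List.pyRange 0 C 1).foldl
              (fun best j =>
                if PySem.List.pyGetD row j "" = ">" ∧
                    PySem.List.pyGetD (pvVals (row ++ row)) (j + 1) 0 > best
                then PySem.List.pyGetD (pvVals (row ++ row)) (j + 1) 0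
                else best) 0))

def pvBLineValue (L : List String) (C : Int) : Int × Int :=
  if (PySem.Set.ofList L).length = 1 then
    if ">" ∈ PySem.Set.ofList L then (0, -1)
    else (-1, if "*" ∈ PySem.Set.ofList L then 1 else 0)
  else if (PySem.Set.ofList L).length = 2 then
    if "*" ∉ PySem.Set.ofList L then (-1, 0)
    else if ">" ∈ PySem.Set.ofList L then ((L.count "*" : Int), 1)
    else (-1, 1)
  else if (PySem.Set.ofList L).length ≠ 4 ∧ "*" ∉ PySem.Set.ofList L then (-1, 0)
  else if (PySem.Set.ofList L).length ≠ 4 ∧ "v" ∉ PySem.Set.ofList L then ((L.count "*" : Int), 1)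
  else if (PySem.Set.ofList L).length ≠ 4 ∧ ">" ∉ PySem.Set.ofList L then (-1, 1)
  else pvBFull L C

def pvBMain (C : Int) : List (List String) → Int → Int → Int
  | [], dw, ms => max dw ms
  | L :: rest, dw, ms =>
      let sd := pvBLineValue L C
      let ms' := if sd.1 ≥ 0 then max ms (dw + sd.1) else ms
      if sd.2 < 0 then ms' else pvBMain C rest (dw + sd.2) ms'

def getMaxCollectableCoins_alt (R : Int) (C : Int) (G : List (List String)) : Int :=
  pvBMain C G 0 0

-- ===== PRECONDITION & SPEC =====

-- a line reaches FullLineValue iff it has 4 distinct symbols or contains '>', 'v' and '*'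
def pvNeedsFull (L : List String) : Prop :=
  (PySem.Set.ofList L).length = 4 ∨ (">" ∈ L ∧ "v" ∈ L ∧ "*" ∈ L)

-- Pre_ excludes grids in which a row that needs the full scan has length ≠ C: there A's C-1-cell
-- window cap and L+L wrap offset read cells by an accidental row-length arithmetic (and both
-- programs raise IndexError when such a row is shorter than C).
def Pre_getMaxCollectableCoins (R : Int) (C : Int) (G : List (List String)) : Prop :=
  ∀ L ∈ G, pvNeedsFull L → (L.length : Int) = C

instance (R : Int) (C : Int) (G : List (List String)) : Decidable (Pre_getMaxCollectableCoins R C G) := by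
  unfold Pre_getMaxCollectableCoins pvNeedsFull; infer_instance

def pvWitness_getMaxCollectableCoins : Int × Int × List (List String) :=
  (1, 3, [[">", "*", "v"], ["."]])

def Spec_getMaxCollectableCoins (R : Int) (C : Int) (G : List (List String)) (out : Int) : Prop := out = getMaxCollectableCoins_alt R C G
instance (R : Int) (C : Int) (G : List (List String)) (out : Int) : Decidable (Spec_getMaxCollectableCoins R C G out) := by unfold Spec_getMaxCollectableCoins; infer_instance

-- ===== CLAIM (what is proved, stated in full; the proofs are below) =====
def Claim_equal_getMaxCollectableCoins : Prop := ∀ (R : Int) (C : Int) (G : List (List String)), Dom_getMaxCollectableCoins R C G → Pre_getMaxCollectableCoins R C G → Spec_getMaxCollectableCoins R C G (getMaxCollectableCoins R C G)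

-- ===== LEMMAS AND PROOFS =====

-- stars collected scanning a list left to right, stopping at the first "v"
def pvCuv : List String → Int
  | [] => 0
  | c :: r => if c = "v" then 0 else (if c = "*" then 1 else 0) + pvCuv r

theorem pvCuv_le_cons (c : String) (r : List String) (h : c ≠ "v") :
    pvCuv r ≤ pvCuv (c :: r) := by
  simp only [pvCuv, if_neg h]; split_ifs <;> omega

theorem pvCuv_append_of_mem : ∀ (w u : List String), "v" ∈ w → pvCuv (w ++ u) = pvCuv w := by
  intro w u hw
  induction w with
  | nil => simp at hw
  | cons c r ih =>
      by_cases hc : c = "v"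
      · subst hc; simp [pvCuv]
      · have hr : "v" ∈ r := by
          rcases List.mem_cons.1 hw with h | h
          · exact absurd h.symm hc
          · exact h
        simp only [List.cons_append, pvCuv, if_neg hc, ih hr]

theorem pvCuv_of_not_mem : ∀ w : List String, "v" ∉ w → pvCuv w = (w.count "*" : Int) := by
  intro w hw
  induction w with
  | nil => simp [pvCuv]
  | cons c r ih =>
      have hc : c ≠ "v" := fun h => hw (by simp [h])
      have hr : "v" ∉ r := fun h => hw (by simp [h])
      simp only [pvCuv, if_neg hc, ih hr, List.count_cons]
      by_cases hs : c = "*" <;> simp [hs] <;> push_cast <;> ring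

theorem pvVals_getD : ∀ (ws : List String) (k : Nat), (pvVals ws).getD k 0 = pvCuv (ws.drop k) := by
  intro ws
  induction ws with
  | nil => intro k; simp [pvVals, pvCuv]
  | cons c r ih =>
      intro k
      cases k with
      | zero =>
          have h0 : (pvVals r).getD 0 0 = pvCuv r := by simpa using ih 0
          simp only [pvVals, List.getD_cons_zero, List.drop_zero, pvCuv, h0]
          split_ifs <;> omega
      | succ k => simpa [pvVals] using ih k

-- clean recursion equal to pvAInner's scan over the explicit window
def pvWscan (bj : Int) : Int → List String → Int → Int × Int
  | _, [], val => (bj, val)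
  | k, c :: rest, val =>
      if c = "v" then (k, val)
      else pvWscan bj (k + 1) rest (val + if c = "*" then 1 else 0)

theorem pvWscan_spec : ∀ (w : List String) (bj k val : Int),
    pvWscan bj k w val =
      ((if "v" ∈ w then k + (List.idxOf "v" w : Int) else bj), val + pvCuv w) := by
  intro w
  induction w with
  | nil => intro bj k val; simp [pvWscan, pvCuv]
  | cons c r ih =>
      intro bj k val
      by_cases hc : c = "v"
      · subst hc; simp [pvWscan, pvCuv, List.idxOf_cons_self]
      · have hvm : ("v" ∈ c :: r) ↔ ("v" ∈ r) := by
          constructor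
          · intro h; rcases List.mem_cons.1 h with h | h
            · exact absurd h.symm hc
            · exact h
          · intro h; exact List.mem_cons_of_mem _ h
        have hidx : List.idxOf "v" (c :: r) = List.idxOf "v" r + 1 := by
          simpa using List.idxOf_cons_ne (a := "v") (b := c) r hc
        simp only [pvWscan, if_neg hc, ih, pvCuv, hvm, hidx]
        rw [Prod.mk.injEq]
        refine ⟨?_, by ring⟩
        split_ifs
        · push_cast; ring
        · rfl

theorem pvAInner_eq_wscan :
    ∀ (fuel : Nat) (ext : List String) (j C a bj val : Int),
      0 ≤ j → 1 ≤ a → (C - a).toNat ≤ fuel → (j + C).toNat ≤ ext.length →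
      pvAInner ext j (PySem.List.pyRange a C 1) (bj, val)
        = pvWscan bj (j + a) ((ext.drop (j + a).toNat).take (C - a).toNat) val := by
  intro fuel
  induction fuel with
  | zero =>
      intro ext j C a bj val hj ha hfuel hlen
      have hca : C ≤ a := by omega
      rw [PySem.List.pyRange_one_eq_nil hca]
      have : (C - a).toNat = 0 := by omega
      simp [pvAInner, this, pvWscan]
  | succ fuel ih =>
      intro ext j C a bj val hj ha hfuel hlen
      by_cases hca : C ≤ a
      · rw [PySem.List.pyRange_one_eq_nil hca]
        have : (C - a).toNat = 0 := by omega
        simp [pvAInner, this, pvWscan]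
      · rw [PySem.List.pyRange_one_cons (by omega)]
        have hidx : (j + a).toNat < ext.length := by omega
        have hget : PySem.List.pyGetD ext (j + a) "" = ext[(j + a).toNat] :=
          PySem.List.pyGetD_eq_getElem ext "" (by omega) (by exact_mod_cast by omega)
        have hdrop : ext.drop (j + a).toNat = ext[(j + a).toNat] :: ext.drop ((j + a).toNat + 1) :=
          List.drop_eq_getElem_cons hidx
        have htk : (C - a).toNat = (C - (a + 1)).toNat + 1 := by omega
        have hrec : ∀ val' : Int,
            pvAInner ext j (PySem.List.pyRange (a + 1) C 1) (bj, val')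
              = pvWscan bj (j + (a + 1)) ((ext.drop (j + (a + 1)).toNat).take (C - (a + 1)).toNat) val' := by
          intro val'
          exact ih ext j C (a + 1) bj val' hj (by omega) (by omega) hlen
        have hnt : (j + (a + 1)).toNat = (j + a).toNat + 1 := by omega
        have hja : j + (a + 1) = j + a + 1 := by ring
        simp only [pvAInner, hget, hdrop, htk, List.take_succ_cons, pvWscan]
        split_ifs with hv hs
        · rfl
        · rw [hrec, hnt, hja]
        · rw [hrec, hnt, hja, add_zero]
-- window value of a '>' at index j, and one step of the abstract running max
def pvW (row ext : List String) (j : Int) : Int :=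
  if "v" ∈ row then pvCuv (ext.drop (j.toNat + 1)) else (row.count "*" : Int)

def pvGstep (row ext : List String) (m j : Int) : Int :=
  if row.getD j.toNat "" = ">" then max m (pvW row ext j) else m

theorem pvFoldl_gstep_const (row ext : List String) :
    ∀ (ks : List Int) (a : Int),
      (∀ k ∈ ks, row.getD k.toNat "" = ">" → pvW row ext k ≤ a) →
      ks.foldl (pvGstep row ext) a = a := by
  intro ks
  induction ks with
  | nil => intro a _; rfl
  | cons k rest ih =>
      intro a h
      have hk : pvGstep row ext a k = a := by
        unfold pvGstep
        split_ifs with hg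
        · have := h k (by simp) hg; omega
        · rfl
      simp only [List.foldl_cons, hk]
      exact ih a (fun k' hk' => h k' (by simp [hk']))

theorem pvFoldl_gstep_exists (row ext : List String) :
    ∀ (ks : List Int) (c : Int), 0 ≤ c →
      (∀ k ∈ ks, row.getD k.toNat "" = ">" → pvW row ext k = c) →
      (∃ k ∈ ks, row.getD k.toNat "" = ">") →
      ks.foldl (pvGstep row ext) 0 = c := by
  intro ks
  induction ks with
  | nil => intro c _ _ h; simp at h
  | cons k rest ih =>
      intro c hc hval hex
      by_cases hg : row.getD k.toNat "" = ">"
      · have h1 : pvGstep row ext 0 k = c := by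
          unfold pvGstep
          rw [if_pos hg, hval k (by simp) hg]
          omega
        simp only [List.foldl_cons, h1]
        exact pvFoldl_gstep_const row ext rest c
          (fun k' hk' hg' => le_of_eq (hval k' (by simp [hk']) hg'))
      · have h1 : pvGstep row ext 0 k = 0 := by unfold pvGstep; rw [if_neg hg]
        simp only [List.foldl_cons, h1]
        rcases hex with ⟨k', hk', hg'⟩
        rcases List.mem_cons.1 hk' with h | h
        · exact absurd (h ▸ hg') hg
        · exact ih c hc (fun k'' hk'' => hval k'' (by simp [hk''])) ⟨k', h, hg'⟩

-- the explicit window seen from index jn equals the rest of the row followed by its start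
theorem pvWindow_eq (row : List String) (jn : Nat) (hj : jn < row.length) :
    (((row ++ row).drop (jn + 1)).take (row.length - 1))
      = row.drop (jn + 1) ++ row.take jn := by
  rw [List.drop_append_of_le_length (by omega), List.take_append,
    List.take_of_length_le (by rw [List.length_drop]; omega), List.length_drop,
    show row.length - 1 - (row.length - (jn + 1)) = jn from by omega]

theorem pvCuv_drop_le (xs : List String) :
    ∀ (d p : Nat), (∀ r, p ≤ r → r < p + d → (h : r < xs.length) → xs[r] ≠ "v") →
      pvCuv (xs.drop (p + d)) ≤ pvCuv (xs.drop p) := by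
  intro d
  induction d with
  | zero => intro p _; simp
  | succ d ih =>
      intro p h
      have step : pvCuv (xs.drop (p + 1)) ≤ pvCuv (xs.drop p) := by
        by_cases hp : p < xs.length
        · rw [List.drop_eq_getElem_cons hp]
          exact pvCuv_le_cons _ _ (h p le_rfl (by omega) hp)
        · rw [List.drop_of_length_le (by omega), List.drop_of_length_le (by omega)]
      have ih' : pvCuv (xs.drop ((p + 1) + d)) ≤ pvCuv (xs.drop (p + 1)) :=
        ih (p + 1) (fun r hr1 hr2 hr3 => h r (by omega) (by omega) hr3)
      have : p + (d + 1) = (p + 1) + d := by omega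
      rw [this]
      exact le_trans ih' step
-- a row containing 'v' puts a 'v' in the window seen from any non-'v' cell
theorem pvV_in_window (row : List String) (jn : Nat) (hj : jn < row.length)
    (hv : "v" ∈ row) (hg : row[jn] ≠ "v") :
    "v" ∈ row.drop (jn + 1) ++ row.take jn := by
  rcases List.mem_iff_getElem.1 hv with ⟨q, hq, hrow⟩
  rcases lt_trichotomy q jn with h | h | h
  · refine List.mem_append.2 (Or.inr ?_)
    refine List.mem_iff_getElem.2 ⟨q, ?_, ?_⟩
    · simp [List.length_take]; omega
    · rw [List.getElem_take]; exact hrow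
  · exact absurd (h ▸ hrow) hg
  · refine List.mem_append.2 (Or.inl ?_)
    refine List.mem_iff_getElem.2 ⟨q - (jn + 1), ?_, ?_⟩
    · simp [List.length_drop]; omega
    · rw [List.getElem_drop]
      simp only [show jn + 1 + (q - (jn + 1)) = q from by omega]
      exact hrow

-- star count of the window from a '>' cell equals the star count of the whole row
theorem pvStars_window (row : List String) (jn : Nat) (hj : jn < row.length)
    (hg : row[jn] = ">") :
    (row.drop (jn + 1) ++ row.take jn).count "*" = row.count "*" := by
  conv_rhs => rw [← List.take_append_drop jn row]
  rw [List.drop_eq_getElem_cons hj, List.count_append, List.count_append, List.count_cons, hg]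
  simp
  omega

theorem pvFullWhile_eq :
    ∀ (fuel : Nat) (row : List String) (j m : Int), 0 ≤ j →
      (((row.length : Int) - j).toNat ≤ fuel) →
      pvFullWhile row (row ++ row) (row.length : Int) j m
        = (PySem.List.pyRange j (row.length : Int) 1).foldl (pvGstep row (row ++ row)) m := by
  intro fuel
  induction fuel with
  | zero =>
      intro row j m hj hf
      have hjc : ¬ j < (row.length : Int) := by omega
      rw [pvFullWhile, dif_neg hjc, PySem.List.pyRange_one_eq_nil (by omega)]
      rfl
  | succ fuel ih =>
      intro row j m hj hf
      by_cases hjc : j < (row.length : Int)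
      case neg =>
        rw [pvFullWhile, dif_neg hjc, PySem.List.pyRange_one_eq_nil (by omega)]
        rfl
      case pos =>
      set n := row.length with hn
      set C := (n : Int)
      set ext := row ++ row with hext
      have hlen2 : ext.length = 2 * n := by rw [hext, List.length_append]; omega
      have hjn : j.toNat < n := by omega
      have hjnat : j = ((j.toNat : Nat) : Int) := by omega
      have hget : PySem.List.pyGetD row j "" = row[j.toNat] :=
        PySem.List.pyGetD_eq_getElem row "" (by omega) (by omega)
      have hgetD : row.getD j.toNat "" = row[j.toNat] := by
        rw [List.getD_eq_getElem?_getD, List.getElem?_eq_getElem hjn]; rfl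
      have hcons : PySem.List.pyRange j C 1 = j :: PySem.List.pyRange (j + 1) C 1 :=
        PySem.List.pyRange_one_cons hjc
      rw [pvFullWhile, dif_pos hjc]
      by_cases hgt : row[j.toNat] = ">"
      case neg =>
        rw [if_pos (by rw [hget]; exact hgt)]
        rw [ih row (j + 1) m (by omega) (by omega), hcons, List.foldl_cons]
        have : pvGstep row ext m j = m := by unfold pvGstep; rw [hgetD, if_neg hgt]
        rw [this]
      case pos =>
      rw [if_neg (by rw [hget]; simp [hgt])]
      -- the inner scan
      have hwin := pvAInner_eq_wscan ((C - 1).toNat) ext j C 1 j 0 hj le_rfl le_rfl (by omega)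
      have hnt1 : (j + 1).toNat = j.toNat + 1 := by omega
      have hnt2 : (C - 1).toNat = n - 1 := by omega
      set w := ((ext.drop (j.toNat + 1)).take (n - 1)) with hw
      rw [hnt1, hnt2] at hwin
      have hweq : w = row.drop (j.toNat + 1) ++ row.take j.toNat := by
        rw [hw, hext]; exact pvWindow_eq row j.toNat hjn
      have hwlen : w.length = n - 1 := by
        rw [hw, List.length_take, List.length_drop, hlen2]; omega
      rw [pvWscan_spec] at hwin
      by_cases hv : "v" ∈ row
      case pos =>
        have hvw : "v" ∈ w := by
          rw [hweq]
          exact pvV_in_window row j.toNat hjn hv (by rw [hgt]; decide)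
        set i0 := List.idxOf "v" w with hi0
        set b := j + 1 + (i0 : Int) with hb
        have hi0lt : i0 < w.length := List.idxOf_lt_length_of_mem hvw
        have hval : pvCuv (ext.drop (j.toNat + 1)) = pvCuv w := by
          conv_lhs => rw [← List.take_append_drop (n - 1) (ext.drop (j.toNat + 1))]
          rw [← hw, pvCuv_append_of_mem _ _ hvw]
        set val := pvCuv (ext.drop (j.toNat + 1)) with hvaldef
        have hr : pvAInner ext j (PySem.List.pyRange 1 C 1) (j, 0) = (b, val) := by
          rw [hwin, if_pos hvw, ← hval]; simp [hb]
        rw [hr]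
        have hm' : (if (b, val).2 > m then (b, val).2 else m) = max m val := by
          simp only []; omega
        rw [hm']
        -- no 'v' strictly inside the window before i0, as ext positions
        have hnov : ∀ r : Nat, j.toNat + 1 ≤ r → r < j.toNat + 1 + i0 → (hr2 : r < ext.length) → ext[r] ≠ "v" := by
          intro r hr1 hr2 hr3
          have hp : r - (j.toNat + 1) < i0 := by omega
          have hplt : r - (j.toNat + 1) < w.length := by omega
          have hwr : w[r - (j.toNat + 1)]'hplt = ext[r] := by
            simp only [hw, List.getElem_take, List.getElem_drop]
            congr 1
            omega
          intro hcon
          have : "v" ∈ w.take i0 := by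
            refine List.mem_iff_getElem.2 ⟨r - (j.toNat + 1), ?_, ?_⟩
            · rw [List.length_take]; omega
            · rw [List.getElem_take, hwr]; exact hcon
          rw [List.mem_take_iff_idxOf_lt hvw] at this
          omega
      -- value of the window from j
        have hWj : pvW row ext j = val := by unfold pvW; rw [if_pos hv]
        have hgj : pvGstep row ext m j = max m val := by
          unfold pvGstep; rw [hgetD, if_pos hgt, hWj]
        -- dominated middle segment
        have hmid : (PySem.List.pyRange (j + 1) (min (b + 1) C) 1).foldl (pvGstep row ext) (max m val) = max m val := by
          apply pvFoldl_gstep_const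
          intro k hk hkg
          rw [PySem.List.mem_pyRange_one] at hk
          have hk1 : j + 1 ≤ k := hk.1
          have hk2 : k < C := by have := hk.2; omega
          have hk3 : k ≤ b := by have := hk.2; omega
          by_cases hkb : k = b
          · exfalso
            have hbn : b.toNat < n := by omega
            have hbv : ext[b.toNat]'(by omega) = "v" := by
              have h1 : w[i0]'hi0lt = "v" := List.getElem_idxOf hi0lt
              simp only [hw, List.getElem_take, List.getElem_drop] at h1
              simp only [show b.toNat = j.toNat + 1 + i0 from by omega]
              exact h1
            have h2 : ext[b.toNat]'(by omega) = row[b.toNat]'hbn := by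
              simp only [hext]
              exact List.getElem_append_left hbn
            have hgd : row.getD k.toNat "" = "v" := by
              rw [show k.toNat = b.toNat from by omega, List.getD_eq_getElem?_getD,
                List.getElem?_eq_getElem hbn, Option.getD_some]
              exact h2.symm.trans hbv
            rw [hgd] at hkg
            exact absurd hkg (by decide)
          · have hkb' : k < b := by omega
            have hWk : pvW row ext k = pvCuv (ext.drop (k.toNat + 1)) := by
              unfold pvW; rw [if_pos hv]
            rw [hWk]
            have hle : pvCuv (ext.drop (k.toNat + 1)) ≤ val := by
              rw [hvaldef]
              have := pvCuv_drop_le ext (k.toNat - j.toNat) (j.toNat + 1)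
                (fun r hr1 hr2 hr3 => hnov r hr1 (by omega) hr3)
              rw [show j.toNat + 1 + (k.toNat - j.toNat) = k.toNat + 1 by omega] at this
              exact this
            omega
        have htail : PySem.List.pyRange (min (b + 1) C) C 1 = PySem.List.pyRange (b + 1) C 1 := by
          by_cases hbc : b + 1 ≤ C
          · rw [min_eq_left hbc]
          · rw [min_eq_right (by omega), PySem.List.pyRange_one_eq_nil le_rfl,
              PySem.List.pyRange_one_eq_nil (by omega)]
        rw [hcons, List.foldl_cons, hgj,
          PySem.List.pyRange_one_append (j + 1) (min (b + 1) C) C (by omega) (by omega),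
          List.foldl_append, hmid, htail]
        exact (ih row (b + 1) (max m val) (by omega) (by omega))
      case neg =>
        have hvext : "v" ∉ ext := by
          rw [hext]; intro hcon; rcases List.mem_append.1 hcon with h | h <;> exact hv h
        have hvw : "v" ∉ w := by
          intro hcon
          exact hvext (List.mem_of_mem_drop (List.mem_of_mem_take (hw ▸ hcon)))
        have hcount : pvCuv w = (row.count "*" : Int) := by
          rw [pvCuv_of_not_mem w hvw, hweq, pvStars_window row j.toNat hjn hgt]
        have hr : pvAInner ext j (PySem.List.pyRange 1 C 1) (j, 0) = (j, (row.count "*" : Int)) := by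
          rw [hwin, if_neg hvw, hcount]; simp
        rw [hr]
        have hm' : (if (j, (row.count "*" : Int)).2 > m then (j, (row.count "*" : Int)).2 else m)
            = max m (row.count "*" : Int) := by simp only []; omega
        rw [hm']
        have hgj : pvGstep row ext m j = max m (row.count "*" : Int) := by
          unfold pvGstep pvW; rw [hgetD, if_pos hgt, if_neg hv]
        rw [hcons, List.foldl_cons, hgj]
        exact ih row (j + 1) (max m (row.count "*" : Int)) (by omega) (by omega)
theorem pvGt_mem_bridge (row : List String) (hgt : ">" ∈ row) :
    ∃ k ∈ PySem.List.pyRange 0 (row.length : Int) 1, row.getD k.toNat "" = ">" := by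
  rcases List.mem_iff_getElem.1 hgt with ⟨q, hq, hrow⟩
  refine ⟨(q : Int), PySem.List.mem_pyRange_one.2 (by constructor <;> omega), ?_⟩
  rw [Int.toNat_natCast, List.getD_eq_getElem?_getD, List.getElem?_eq_getElem hq, hrow]
  rfl

theorem pvGetD_gt_mem (row : List String) (k : Int) (h : row.getD k.toNat "" = ">") : ">" ∈ row := by
  by_cases hk : k.toNat < row.length
  · rw [List.getD_eq_getElem?_getD, List.getElem?_eq_getElem hk] at h
    exact h ▸ List.getElem_mem hk
  · rw [List.getD_eq_getElem?_getD, List.getElem?_eq_none (by omega)] at h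
    exact absurd h (by decide)

-- B's per-line best equals the abstract running max A's loop is reduced to
theorem pvBbest_eq (row : List String) :
    (if "v" ∉ row then
       if ">" ∈ row then (row.count "*" : Int) else 0
     else
       (PySem.List.pyRange 0 (row.length : Int) 1).foldl
         (fun best j =>
           if PySem.List.pyGetD row j "" = ">" ∧
               PySem.List.pyGetD (pvVals (row ++ row)) (j + 1) 0 > best
           then PySem.List.pyGetD (pvVals (row ++ row)) (j + 1) 0
           else best) 0)
    = (PySem.List.pyRange 0 (row.length : Int) 1).foldl (pvGstep row (row ++ row)) 0 := by
  by_cases hv : "v" ∈ row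
  case pos =>
    rw [if_neg (by simp [hv])]
    apply PySem.List.foldl_congr_mem
    intro acc k hk
    rw [PySem.List.mem_pyRange_one] at hk
    have hkn : k.toNat < row.length := by omega
    have h1 : PySem.List.pyGetD row k "" = row.getD k.toNat "" := by
      rw [show k = ((k.toNat : Nat) : Int) by omega, PySem.List.pyGetD_natCast, Int.toNat_natCast]
    have h2 : PySem.List.pyGetD (pvVals (row ++ row)) (k + 1) 0
        = pvCuv ((row ++ row).drop (k.toNat + 1)) := by
      rw [show k + 1 = (((k.toNat + 1 : Nat)) : Int) by omega, PySem.List.pyGetD_natCast,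
        pvVals_getD]
    rw [h1, h2]
    unfold pvGstep pvW
    rw [if_pos hv]
    by_cases hg : row.getD k.toNat "" = ">"
    · rw [if_pos hg]
      by_cases hvgt : pvCuv ((row ++ row).drop (k.toNat + 1)) > acc
      · rw [if_pos ⟨hg, hvgt⟩]
        omega
      · rw [if_neg (fun hc => hvgt hc.2)]
        omega
    · rw [if_neg hg, if_neg (fun hc => hg hc.1)]
  case neg =>
    rw [if_pos hv]
    by_cases hgt : ">" ∈ row
    case pos =>
      rw [if_pos hgt]
      refine (pvFoldl_gstep_exists row (row ++ row) _ _ (Int.natCast_nonneg _) ?_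
        (pvGt_mem_bridge row hgt)).symm
      intro k _ _
      unfold pvW
      rw [if_neg hv]
    case neg =>
      rw [if_neg hgt]
      refine (pvFoldl_gstep_const row (row ++ row) _ _ ?_).symm
      intro k hk hkg
      exact absurd (pvGetD_gt_mem row k hkg) hgt

theorem pvFull_eq (row : List String) :
    pvFullLineValue row (row.length : Int) = pvBFull row (row.length : Int) := by
  have hA : pvFullWhile row (row ++ row) (row.length : Int) 0 0
      = (PySem.List.pyRange 0 (row.length : Int) 1).foldl (pvGstep row (row ++ row)) 0 :=
    pvFullWhile_eq row.length row 0 0 le_rfl (by omega)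
  unfold pvFullLineValue pvBFull
  rw [hA, pvBbest_eq]

theorem pvLineValue_eq (L : List String) (C : Int) (h : pvNeedsFull L → (L.length : Int) = C) :
    pvLineValue L C (pvLineType L) = pvBLineValue L C := by
  unfold pvLineValue pvBLineValue pvLineType
  by_cases h1 : (PySem.Set.ofList L).length = 1
  · rw [if_pos h1, if_pos h1]
  · rw [if_neg h1, if_neg h1]
    by_cases h4 : (PySem.Set.ofList L).length = 4
    · have hC : (L.length : Int) = C := h (Or.inl h4)
      rw [if_pos h4, if_neg (by omega)]
      simp only [ne_eq, h4, not_true_eq_false, false_and, if_false]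
      rw [← hC]
      exact pvFull_eq L
    · rw [if_neg h4]
      by_cases h2 : (PySem.Set.ofList L).length = 2
      · rw [if_pos h2, if_pos h2]
      · rw [if_neg h2, if_neg h2]
        simp only [ne_eq, h4, not_false_eq_true, true_and]
        by_cases hs : "*" ∈ PySem.Set.ofList L
        · by_cases hvv : "v" ∈ PySem.Set.ofList L
          · by_cases hgg : ">" ∈ PySem.Set.ofList L
            · rw [if_neg (fun hc => hc hs), if_neg (fun hc => hc hvv),
                if_neg (fun hc => hc hgg), if_neg (fun hc => hc hs),
                if_neg (fun hc => hc hvv), if_neg (fun hc => hc hgg)]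
              have hC : (L.length : Int) = C := by
                refine h (Or.inr ?_)
                exact ⟨(PySem.Set.mem_ofList L ">").1 hgg, (PySem.Set.mem_ofList L "v").1 hvv,
                  (PySem.Set.mem_ofList L "*").1 hs⟩
              rw [← hC]
              exact pvFull_eq L
            · rw [if_neg (fun hc => hc hs), if_neg (fun hc => hc hvv), if_pos hgg,
                if_neg (fun hc => hc hs), if_neg (fun hc => hc hvv), if_pos hgg]
          · rw [if_neg (fun hc => hc hs), if_pos hvv, if_neg (fun hc => hc hs), if_pos hvv]
        · rw [if_pos hs, if_pos hs]

theorem pvMain_eq (C : Int) : ∀ (G : List (List String)) (dw ms : Int),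
    (∀ L ∈ G, pvNeedsFull L → (L.length : Int) = C) →
    pvAMain C G dw ms = pvBMain C G dw ms := by
  intro G
  induction G with
  | nil => intro dw ms _; rfl
  | cons L rest ih =>
      intro dw ms h
      have hL := pvLineValue_eq L C (h L (by simp))
      simp only [pvAMain, pvBMain, hL]
      by_cases hd : (pvBLineValue L C).2 ≥ 0
      · rw [if_pos hd, if_neg (show ¬ (pvBLineValue L C).2 < 0 from by omega)]
        exact ih _ _ (fun L' hL' => h L' (by simp [hL']))
      · rw [if_neg hd, if_pos (show (pvBLineValue L C).2 < 0 from by omega)]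

-- ===== VERDICT (by name: the statement is the Claim_ definition above) =====
theorem getMaxCollectableCoins_spec : Claim_equal_getMaxCollectableCoins := by
  intro R C G _ hpre
  unfold Spec_getMaxCollectableCoins getMaxCollectableCoins getMaxCollectableCoins_alt
  exact pvMain_eq C G 0 0 hpre
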